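-- pv_equiv track=rewrite | github.com/gwarmstrong/taxanet | kraken_net.py | _get_nodes_to_all_descendents
-- ===== SOURCE A (Python) =====
-- def _get_nodes_to_all_descendents(nodes, root=1, mapping=None):
--     if mapping is None:
--         mapping = {0: {0}}
--     mapping[root] = set()
--     if root in nodes:
--         for child in nodes[root]:
--             _get_nodes_to_all_descendents(nodes, root=child, mapping=mapping)
--             mapping[root].update(mapping[child])
--             mapping[root].add(child)
--     else:
--         mapping[root].add(root)
--     return mapping
-- ===== SOURCE B (Python) =====
-- def _get_nodes_to_all_descendents(nodes, root=1, mapping=None):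
--     if mapping is None:
--         mapping = {0: {0}}
--
--     def walk(node):
--         # pure post-order synthesis: returns (descendant set of node,
--         # ordered list of (node, set) dict writes in first-visit order)
--         if node not in nodes:
--             s = {node}
--             return s, [(node, s)]
--         s = set()
--         entries = [(node, s)]
--         for child in nodes[node]:
--             child_set, child_entries = walk(child)
--             entries += child_entries
--             s.update(child_set)
--             s.add(child)
--         return s, entries
--
--     _, entries = walk(root)
--     for k, v in entries:
--         mapping[k] = v
--     return mapping
-- ===== Notes on version B (the rewrite author's own statement) =====
-- stated objective: alternative
-- what changed: A threads one shared dict through the recursion, mutating mapping[root] in place after each child; B is a pure post-order synthesis: each subtree returns (its descendant set, the ordered list of (node, set) dict writes), and the collected writes are replayed onto the mapping once at the end.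
import Mathlib
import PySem

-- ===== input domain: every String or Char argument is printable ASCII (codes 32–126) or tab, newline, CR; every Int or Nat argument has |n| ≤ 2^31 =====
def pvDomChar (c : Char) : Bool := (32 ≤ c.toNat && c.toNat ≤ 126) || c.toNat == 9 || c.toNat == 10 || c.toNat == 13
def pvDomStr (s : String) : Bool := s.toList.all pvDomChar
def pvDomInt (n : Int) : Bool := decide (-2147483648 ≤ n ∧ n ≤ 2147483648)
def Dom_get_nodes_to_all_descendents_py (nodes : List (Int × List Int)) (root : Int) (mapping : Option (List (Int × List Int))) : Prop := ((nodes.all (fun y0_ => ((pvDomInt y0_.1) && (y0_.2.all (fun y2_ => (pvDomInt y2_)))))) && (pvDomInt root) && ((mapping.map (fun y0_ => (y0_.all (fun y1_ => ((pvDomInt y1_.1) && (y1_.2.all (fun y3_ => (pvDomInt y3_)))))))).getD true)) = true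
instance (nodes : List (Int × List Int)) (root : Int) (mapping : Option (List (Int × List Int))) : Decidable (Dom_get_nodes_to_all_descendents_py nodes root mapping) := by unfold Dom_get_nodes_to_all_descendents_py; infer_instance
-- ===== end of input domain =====

-- B replaces A's in-place mutation of the shared dict during the recursion by a pure post-order
-- synthesis (each subtree returns its descendant set plus the ordered list of dict writes, replayed
-- onto the mapping at the end); same return value, and both mutate the caller's mapping in Python.

-- ===== PORT A =====
-- recursion depth of the Python is bounded by nodes.length + 2 on every input where it returns
-- (it raises RecursionError on cycles, excluded by Pre_ below); the fuel only makes the port total.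
def pvAcore (nd : PySem.Dict Int (List Int)) : Nat → Int → PySem.Dict Int (List Int) → Option (PySem.Dict Int (List Int))
  | 0, _, _ => none
  | f+1, root, m =>
    -- mapping[root] = set()
    let m1 := m.insert root PySem.Set.empty
    match nd.get? root with
    | some cs =>
        -- for child in nodes[root]: recurse; mapping[root].update(mapping[child]); mapping[root].add(child)
        cs.foldl (fun om c =>
          om.bind (fun m2 =>
            (pvAcore nd f c m2).map (fun m' =>
              (m'.modify root [] (fun s => PySem.Set.update s (m'.getD c []))).modify root
                [] (fun s => PySem.Set.add s c)))) (some m1)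
    | none => some (m1.modify root [] (fun s => PySem.Set.add s root))

def get_nodes_to_all_descendents_py (nodes : List (Int × List Int)) (root : Int) (mapping : Option (List (Int × List Int))) : List (Int × List Int) :=
  let m0 := match mapping with
    | none => PySem.Dict.ofList [((0 : Int), [(0 : Int)])]   -- mapping = {0: {0}}
    | some m => PySem.Dict.ofList m
  let nd := PySem.Dict.ofList nodes
  ((pvAcore nd (nodes.length + 2) root m0).getD m0).items

-- ===== PORT B =====
-- walk(node): returns (descendant set, ordered (node, set) write list); same fuel guard as port A.
def pvWalk (nd : PySem.Dict Int (List Int)) : Nat → Int → Option (List Int × List (Int × List Int))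
  | 0, _ => none
  | f+1, n =>
    match nd.get? n with
    | none =>
        let s := PySem.Set.add PySem.Set.empty n
        some (s, [(n, s)])
    | some cs =>
        (cs.foldl (fun acc c =>
          acc.bind (fun p =>
            (pvWalk nd f c).map (fun q =>
              (PySem.Set.add (PySem.Set.update p.1 q.1) c, p.2 ++ q.2))))
          (some (PySem.Set.empty, []))).map (fun p => (p.1, (n, p.1) :: p.2))

-- for k, v in entries: mapping[k] = v
def pvApplyEntries (es : List (Int × List Int)) (m : PySem.Dict Int (List Int)) : PySem.Dict Int (List Int) :=
  es.foldl (fun m kv => m.insert kv.1 kv.2) m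

def get_nodes_to_all_descendents_py_alt (nodes : List (Int × List Int)) (root : Int) (mapping : Option (List (Int × List Int))) : List (Int × List Int) :=
  let m0 := match mapping with
    | none => PySem.Dict.ofList [((0 : Int), [(0 : Int)])]
    | some m => PySem.Dict.ofList m
  let nd := PySem.Dict.ofList nodes
  (match pvWalk nd (nodes.length + 2) root with
   | none => m0
   | some p => pvApplyEntries p.2 m0).items

-- ===== PRECONDITION & SPEC =====
-- helpers for Pre_: one-step successor expansion and its bounded closure (reachability in the
-- child graph of `nodes`); purely a graph property of the input, not a run of either port.
def pvExpand (nd : PySem.Dict Int (List Int)) (s : List Int) : List Int :=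
  s.foldl (fun acc x =>
    match nd.get? x with
    | some cs => PySem.Set.update acc cs
    | none => acc) s

def pvClosure (nd : PySem.Dict Int (List Int)) : Nat → List Int → List Int
  | 0, s => s
  | n+1, s => pvClosure nd n (pvExpand nd s)

-- Pre_ excludes exactly the inputs on which the Python A recurses forever through a cycle and
-- raises RecursionError: some node reachable from root is a key of `nodes` that can reach itself
-- again through at least one child edge.
def Pre_get_nodes_to_all_descendents_py (nodes : List (Int × List Int)) (root : Int) (mapping : Option (List (Int × List Int))) : Prop :=
  ((pvClosure (PySem.Dict.ofList nodes) (nodes.length + 1) (PySem.Set.add PySem.Set.empty root)).all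
    (fun k =>
      match (PySem.Dict.ofList nodes).get? k with
      | some cs => !((pvClosure (PySem.Dict.ofList nodes) (nodes.length + 1) (PySem.Set.ofList cs)).contains k)
      | none => true)) = true

instance (nodes : List (Int × List Int)) (root : Int) (mapping : Option (List (Int × List Int))) : Decidable (Pre_get_nodes_to_all_descendents_py nodes root mapping) := by
  unfold Pre_get_nodes_to_all_descendents_py; infer_instance

def pvWitness_get_nodes_to_all_descendents_py : (List (Int × List Int)) × Int × (Option (List (Int × List Int))) :=
  ([(1, [2, 3]), (2, [4])], 1, none)

def Spec_get_nodes_to_all_descendents_py (nodes : List (Int × List Int)) (root : Int) (mapping : Option (List (Int × List Int))) (out : List (Int × List Int)) : Prop := out = get_nodes_to_all_descendents_py_alt nodes root mapping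
instance (nodes : List (Int × List Int)) (root : Int) (mapping : Option (List (Int × List Int))) (out : List (Int × List Int)) : Decidable (Spec_get_nodes_to_all_descendents_py nodes root mapping out) := by unfold Spec_get_nodes_to_all_descendents_py; infer_instance

-- ===== CLAIM (what is proved, stated in full; the proofs are below) =====
def Claim_equal_get_nodes_to_all_descendents_py : Prop := ∀ (nodes : List (Int × List Int)) (root : Int) (mapping : Option (List (Int × List Int))), Dom_get_nodes_to_all_descendents_py nodes root mapping → Pre_get_nodes_to_all_descendents_py nodes root mapping → Spec_get_nodes_to_all_descendents_py nodes root mapping (get_nodes_to_all_descendents_py nodes root mapping)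

-- ===== LEMMAS AND PROOFS =====

-- the two loop bodies, named for the proofs (definitionally the lambdas inside the ports)
def pvFA (nd : PySem.Dict Int (List Int)) (f : Nat) (root : Int) (om : Option (PySem.Dict Int (List Int))) (c : Int) : Option (PySem.Dict Int (List Int)) :=
  om.bind (fun m2 =>
    (pvAcore nd f c m2).map (fun m' =>
      (m'.modify root [] (fun s => PySem.Set.update s (m'.getD c []))).modify root
        [] (fun s => PySem.Set.add s c)))

def pvFB (nd : PySem.Dict Int (List Int)) (f : Nat) (acc : Option (List Int × List (Int × List Int))) (c : Int) : Option (List Int × List (Int × List Int)) :=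
  acc.bind (fun p =>
    (pvWalk nd f c).map (fun q =>
      (PySem.Set.add (PySem.Set.update p.1 q.1) c, p.2 ++ q.2)))

theorem pvAcore_succ_key {nd : PySem.Dict Int (List Int)} {n : Int} {cs : List Int} (h : nd.get? n = some cs) (f : Nat) (m : PySem.Dict Int (List Int)) :
    pvAcore nd (f+1) n m = cs.foldl (pvFA nd f n) (some (m.insert n PySem.Set.empty)) := by
  simp only [pvAcore, h]
  rfl

theorem pvAcore_succ_nonkey {nd : PySem.Dict Int (List Int)} {n : Int} (h : nd.get? n = none) (f : Nat) (m : PySem.Dict Int (List Int)) :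
    pvAcore nd (f+1) n m = some ((m.insert n PySem.Set.empty).modify n [] (fun s => PySem.Set.add s n)) := by
  simp [pvAcore, h]

theorem pvWalk_succ_key {nd : PySem.Dict Int (List Int)} {n : Int} {cs : List Int} (h : nd.get? n = some cs) (f : Nat) :
    pvWalk nd (f+1) n = (cs.foldl (pvFB nd f) (some (PySem.Set.empty, []))).map (fun p => (p.1, (n, p.1) :: p.2)) := by
  simp only [pvWalk, h]
  rfl

theorem pvWalk_succ_nonkey {nd : PySem.Dict Int (List Int)} {n : Int} (h : nd.get? n = none) (f : Nat) :
    pvWalk nd (f+1) n = some (PySem.Set.add PySem.Set.empty n, [(n, PySem.Set.add PySem.Set.empty n)]) := by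
  simp [pvWalk, h]

-- generic fold facts
theorem pvFoldl_none_absorb {α γ : Type} (F : Option α → γ → Option α) (hF : ∀ c, F none c = none) :
    ∀ (cs : List γ), cs.foldl F none = none := by
  intro cs; induction cs with
  | nil => rfl
  | cons c cs ih => simp [List.foldl, hF c, ih]

theorem pvFB_child_some {nd : PySem.Dict Int (List Int)} {f : Nat} :
    ∀ (cs : List Int) (a b : List Int × List (Int × List Int)),
      cs.foldl (pvFB nd f) (some a) = some b → ∀ c ∈ cs, ∃ q, pvWalk nd f c = some q := by
  intro cs
  induction cs with
  | nil => intro a b _ c hc; cases hc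
  | cons c0 cs ih =>
    intro a b hfold c hc
    rcases hq : pvWalk nd f c0 with _ | q0
    · rw [List.foldl_cons] at hfold
      have hstep : pvFB nd f (some a) c0 = none := by simp [pvFB, hq]
      rw [hstep, pvFoldl_none_absorb _ (fun c => rfl)] at hfold
      cases hfold
    · rcases List.mem_cons.mp hc with hc | hc
      · exact ⟨q0, hc ▸ hq⟩
      · rw [List.foldl_cons] at hfold
        have hstep : pvFB nd f (some a) c0 = some (PySem.Set.add (PySem.Set.update a.1 q0.1) c0, a.2 ++ q0.2) := by
          simp [pvFB, hq]
        rw [hstep] at hfold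
        exact ih _ _ hfold c hc

theorem pvFB_entries_origin {nd : PySem.Dict Int (List Int)} {f : Nat} :
    ∀ (cs : List Int) (a b : List Int × List (Int × List Int)),
      cs.foldl (pvFB nd f) (some a) = some b →
      ∀ kv ∈ b.2, kv ∈ a.2 ∨ ∃ c ∈ cs, ∃ q, pvWalk nd f c = some q ∧ kv ∈ q.2 := by
  intro cs
  induction cs with
  | nil => intro a b hfold kv hkv; cases hfold; exact Or.inl hkv
  | cons c0 cs ih =>
    intro a b hfold kv hkv
    rcases hq : pvWalk nd f c0 with _ | q0
    · rw [List.foldl_cons] at hfold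
      have hstep : pvFB nd f (some a) c0 = none := by simp [pvFB, hq]
      rw [hstep, pvFoldl_none_absorb _ (fun c => rfl)] at hfold
      cases hfold
    · rw [List.foldl_cons] at hfold
      have hstep : pvFB nd f (some a) c0 = some (PySem.Set.add (PySem.Set.update a.1 q0.1) c0, a.2 ++ q0.2) := by
        simp [pvFB, hq]
      rw [hstep] at hfold
      rcases ih _ _ hfold kv hkv with hin | ⟨c, hc, q, hwq, hin⟩
      · rcases List.mem_append.mp hin with h1 | h2
        · exact Or.inl h1
        · exact Or.inr ⟨c0, List.mem_cons_self .., ⟨q0, hq, h2⟩⟩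
      · exact Or.inr ⟨c, List.mem_cons_of_mem _ hc, q, hwq, hin⟩

-- shape: a successful walk's entry list starts with (n, its set)
theorem pvWalk_shape {nd : PySem.Dict Int (List Int)} {f : Nat} {n : Int} {s : List Int} {es : List (Int × List Int)}
    (h : pvWalk nd f n = some (s, es)) : ∃ t, es = (n, s) :: t := by
  cases f with
  | zero => cases h
  | succ f =>
    rcases hg : nd.get? n with _ | cs
    · rw [pvWalk_succ_nonkey hg] at h
      injection h with h'
      simp only [Prod.mk.injEq] at h'
      obtain ⟨hs, he⟩ := h'
      exact ⟨[], by rw [← he, hs]⟩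
    · rw [pvWalk_succ_key hg] at h
      rcases hfold : List.foldl (pvFB nd f) (some (PySem.Set.empty, [])) cs with _ | p
      · rw [hfold] at h; cases h
      · rw [hfold] at h
        injection h with h'
        simp only [Prod.mk.injEq] at h'
        obtain ⟨hs, he⟩ := h'
        exact ⟨p.2, by rw [← he, hs]⟩

-- reachability in the child graph
inductive pvReach (nd : PySem.Dict Int (List Int)) : Int → Int → Prop
  | refl (n : Int) : pvReach nd n n
  | step {n c k : Int} (cs : List Int) : nd.get? n = some cs → c ∈ cs → pvReach nd c k → pvReach nd n k

theorem pvWalk_child_some {nd : PySem.Dict Int (List Int)} {f : Nat} {n : Int} {cs : List Int} {p : List Int × List (Int × List Int)}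
    (hg : nd.get? n = some cs) (h : pvWalk nd (f+1) n = some p) :
    ∀ c ∈ cs, ∃ q, pvWalk nd f c = some q := by
  rw [pvWalk_succ_key hg] at h
  rcases hfold : List.foldl (pvFB nd f) (some (PySem.Set.empty, [])) cs with _ | p0
  · rw [hfold] at h; cases h
  · exact pvFB_child_some cs _ _ hfold

theorem pvReach_some {nd : PySem.Dict Int (List Int)} {a b : Int} (hr : pvReach nd a b) :
    ∀ (g : Nat) (p : List Int × List (Int × List Int)), pvWalk nd g a = some p →
      ∃ g' ≤ g, ∃ q, pvWalk nd g' b = some q := by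
  induction hr with
  | refl n => intro g p h; exact ⟨g, le_refl g, p, h⟩
  | step cs hg hc _ ih =>
    intro g p h
    cases g with
    | zero => cases h
    | succ g =>
      rcases pvWalk_child_some hg h _ hc with ⟨q, hq⟩
      rcases ih g q hq with ⟨g', hle, q', hq'⟩
      exact ⟨g', le_trans hle (Nat.le_succ g), q', hq'⟩

theorem pvCycle_none {nd : PySem.Dict Int (List Int)} :
    ∀ (g : Nat) (n : Int) (cs : List Int) (c : Int), nd.get? n = some cs → c ∈ cs → pvReach nd c n →
      pvWalk nd g n = none := by
  intro g
  induction g using Nat.strong_induction_on with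
  | _ g IH =>
    intro n cs c hg hc hr
    cases g with
    | zero => rfl
    | succ g =>
      rcases h : pvWalk nd (g+1) n with _ | p
      · rfl
      · exfalso
        rcases pvWalk_child_some hg h _ hc with ⟨q, hq⟩
        rcases pvReach_some hr g q hq with ⟨g', hle, q', hq'⟩
        have hnone : pvWalk nd g' n = none := IH g' (Nat.lt_succ_of_le hle) n cs c hg hc hr
        rw [hnone] at hq'; cases hq'

theorem pvEntries_reach {nd : PySem.Dict Int (List Int)} :
    ∀ (f : Nat) (n : Int) (s : List Int) (es : List (Int × List Int)),
      pvWalk nd f n = some (s, es) → ∀ kv ∈ es, pvReach nd n kv.1 := by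
  intro f
  induction f using Nat.strong_induction_on with
  | _ f IH =>
    intro n s es h kv hkv
    cases f with
    | zero => cases h
    | succ f =>
      rcases hg : nd.get? n with _ | cs
      · rw [pvWalk_succ_nonkey hg] at h
        injection h with h'
        simp only [Prod.mk.injEq] at h'
        obtain ⟨hs, he⟩ := h'
        rw [← he] at hkv
        rw [List.mem_singleton] at hkv
        rw [hkv]
        exact pvReach.refl n
      · rw [pvWalk_succ_key hg] at h
        rcases hfold : List.foldl (pvFB nd f) (some (PySem.Set.empty, [])) cs with _ | p
        · rw [hfold] at h; cases h
        · rw [hfold] at h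
          injection h with h'
          simp only [Prod.mk.injEq] at h'
          obtain ⟨hs, he⟩ := h'
          rw [← he] at hkv
          rcases List.mem_cons.mp hkv with hkv | hkv
          · rw [hkv]
            exact pvReach.refl n
          · rcases pvFB_entries_origin cs _ _ hfold kv hkv with hin | ⟨c, hc, q, hwq, hin⟩
            · cases hin
            · have hrc := IH f (Nat.lt_succ_self f) c q.1 q.2 (by rw [hwq]) kv hin
              exact pvReach.step cs hg hc hrc

theorem pvEntry_not_ancestor {nd : PySem.Dict Int (List Int)} {g : Nat} {n c : Int} {cs : List Int} {sc : List Int} {esc : List (Int × List Int)}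
    (hg : nd.get? n = some cs) (hc : c ∈ cs) (hw : pvWalk nd g c = some (sc, esc)) :
    ∀ v, (n, v) ∉ esc := by
  intro v hin
  have hr : pvReach nd c n := pvEntries_reach g c sc esc hw (n, v) hin
  rcases pvReach_some hr g (sc, esc) hw with ⟨g', _, q', hq'⟩
  have hnone : pvWalk nd g' n = none := pvCycle_none g' n cs c hg hc hr
  rw [hnone] at hq'; cases hq'

theorem pvWalk_no_self_tail {nd : PySem.Dict Int (List Int)} {f : Nat} {n : Int} {s : List Int} {t : List (Int × List Int)}
    (h : pvWalk nd f n = some (s, (n, s) :: t)) : ∀ v, (n, v) ∉ t := by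
  intro v hin
  cases f with
  | zero => cases h
  | succ f =>
    rcases hg : nd.get? n with _ | cs
    · rw [pvWalk_succ_nonkey hg] at h
      injection h with h'
      simp only [Prod.mk.injEq] at h'
      obtain ⟨hs, he⟩ := h'
      have ht : t = [] := by
        have := congrArg List.tail he
        simpa using this.symm
      rw [ht] at hin
      cases hin
    · rw [pvWalk_succ_key hg] at h
      rcases hfold : List.foldl (pvFB nd f) (some (PySem.Set.empty, [])) cs with _ | p
      · rw [hfold] at h; cases h
      · rw [hfold] at h
        injection h with h'
        simp only [Prod.mk.injEq] at h'
        obtain ⟨hs, he⟩ := h'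
        have hp2 : p.2 = t := by
          have := congrArg List.tail he
          simpa using this
        rcases pvFB_entries_origin cs _ _ hfold (n, v) (by rw [hp2]; exact hin) with hin0 | ⟨c, hc, q, hwq, hin0⟩
        · cases hin0
        · exact pvEntry_not_ancestor hg hc (by rw [hwq]) v hin0

-- dict lemmas
theorem pvApplyEntries_append (es es' : List (Int × List Int)) (m : PySem.Dict Int (List Int)) :
    pvApplyEntries (es ++ es') m = pvApplyEntries es' (pvApplyEntries es m) := by
  simp [pvApplyEntries, List.foldl_append]

theorem pvApplyEntries_cons (k : Int) (v : List Int) (es : List (Int × List Int)) (m : PySem.Dict Int (List Int)) :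
    pvApplyEntries ((k, v) :: es) m = pvApplyEntries es (m.insert k v) := rfl

theorem pvGetD_applyEntries_notmem {k : Int} :
    ∀ (es : List (Int × List Int)) (m : PySem.Dict Int (List Int)), (∀ v, (k, v) ∉ es) →
      (pvApplyEntries es m).getD k [] = m.getD k [] := by
  intro es
  induction es with
  | nil => intro m _; rfl
  | cons kv es ih =>
    intro m hk
    have hne : k ≠ kv.1 := by
      intro he
      exact hk kv.2 (by rw [he]; exact List.mem_cons_self ..)
    obtain ⟨a, v⟩ := kv
    rw [pvApplyEntries_cons, ih _ (fun v hv => hk v (List.mem_cons_of_mem _ hv)),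
      PySem.Dict.getD_insert_of_ne]
    exact hne

theorem pvInsert_insert_comm {X : PySem.Dict Int (List Int)} {a n : Int} {u w : List Int}
    (hne : a ≠ n) (hcn : X.contains n = true) :
    (X.insert a u).insert n w = (X.insert n w).insert a u := by
  have hc1 : (X.insert a u).contains n = true := by
    rw [PySem.Dict.contains_insert, hcn, Bool.or_true]
  have hc2 : (X.insert n w).contains a = X.contains a := by
    rw [PySem.Dict.contains_insert]
    simp [hne]
  apply PySem.Dict.ext
  rcases hXa : X.contains a with _ | _
  · -- a fresh: both sides replace n in place and append (a, u)
    rw [PySem.Dict.items_insert_of_contains, PySem.Dict.items_insert_of_not_contains,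
      PySem.Dict.items_insert_of_not_contains, PySem.Dict.items_insert_of_contains,
      List.map_append]
    · simp [hne]
    · exact hcn
    · rw [hc2]; exact hXa
    · exact hXa
    · exact hc1
  · -- both present: two in-place replacements at distinct keys commute
    rw [PySem.Dict.items_insert_of_contains, PySem.Dict.items_insert_of_contains,
      PySem.Dict.items_insert_of_contains, PySem.Dict.items_insert_of_contains,
      List.map_map, List.map_map]
    · apply List.map_congr_left
      intro p _
      by_cases hpa : p.1 = a
      · have hpn : p.1 ≠ n := by rw [hpa]; exact hne
        simp [hpa, hpn, hne]
      · by_cases hpn : p.1 = n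
        · simp [hpa, hpn, Ne.symm hne]
        · simp [hpa, hpn]
    · exact hcn
    · rw [hc2]; exact hXa
    · exact hXa
    · exact hc1

theorem pvApplyEntries_insert_comm {k : Int} {w : List Int} :
    ∀ (es : List (Int × List Int)) (X : PySem.Dict Int (List Int)), (∀ v, (k, v) ∉ es) → X.contains k = true →
      (pvApplyEntries es X).insert k w = pvApplyEntries es (X.insert k w) := by
  intro es
  induction es with
  | nil => intro X _ _; rfl
  | cons kv es ih =>
    intro X hk hc
    have hne : kv.1 ≠ k := by
      intro he
      exact hk kv.2 (by rw [← he]; exact List.mem_cons_self ..)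
    obtain ⟨a, v⟩ := kv
    rw [pvApplyEntries_cons, pvApplyEntries_cons,
      ih (X.insert a v) (fun v hv => hk v (List.mem_cons_of_mem _ hv))
        (by rw [PySem.Dict.contains_insert, hc, Bool.or_true]),
      pvInsert_insert_comm hne hc]

-- overwrite the value at an already-reserved key n, commuting past entries that never touch n
theorem pvSetKey {n : Int} {es : List (Int × List Int)} (hes : ∀ v, (n, v) ∉ es)
    (m : PySem.Dict Int (List Int)) (u w : List Int) :
    (pvApplyEntries es (m.insert n u)).insert n w = pvApplyEntries es (m.insert n w) := by
  rw [pvApplyEntries_insert_comm es _ hes (PySem.Dict.contains_insert_self _ _ _),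
    PySem.Dict.insert_insert_self]

theorem pvGetD_reserved {n : Int} {es : List (Int × List Int)} (hes : ∀ v, (n, v) ∉ es)
    (m : PySem.Dict Int (List Int)) (u : List Int) :
    (pvApplyEntries es (m.insert n u)).getD n [] = u := by
  rw [pvGetD_applyEntries_notmem es _ hes, PySem.Dict.getD_insert_self]

-- the heart: port A's state-threading recursion computes exactly "replay port B's entry list"
theorem pvMain {nd : PySem.Dict Int (List Int)} :
    ∀ (f : Nat) (n : Int) (m : PySem.Dict Int (List Int)),
      pvAcore nd f n m = (pvWalk nd f n).map (fun p => pvApplyEntries p.2 m) := by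
  intro f
  induction f with
  | zero => intro n m; rfl
  | succ f IH =>
    intro n m
    rcases hg : nd.get? n with _ | cs
    · rw [pvAcore_succ_nonkey hg, pvWalk_succ_nonkey hg]
      simp only [Option.map_some]
      rw [pvApplyEntries_cons]
      show some ((m.insert n PySem.Set.empty).insert n
        (PySem.Set.add ((m.insert n PySem.Set.empty).getD n []) n)) = _
      rw [PySem.Dict.getD_insert_self, PySem.Dict.insert_insert_self]
      rfl
    · rw [pvAcore_succ_key hg, pvWalk_succ_key hg]
      -- inner loop invariant, generalized over a suffix of the children list
      suffices h : ∀ (cs' : List Int), (∀ c ∈ cs', c ∈ cs) →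
          ∀ (s : List Int) (es : List (Int × List Int)), (∀ v, (n, v) ∉ es) →
          cs'.foldl (pvFA nd f n) (some (pvApplyEntries es (m.insert n s))) =
            (cs'.foldl (pvFB nd f) (some (s, es))).map (fun p => pvApplyEntries p.2 (m.insert n p.1)) by
        have h0 := h cs (fun c hc => hc) PySem.Set.empty [] (by intro v hv; cases hv)
        rw [show pvApplyEntries [] (m.insert n PySem.Set.empty) = m.insert n PySem.Set.empty from rfl] at h0
        rw [h0, Option.map_map]
        rfl
      intro cs'
      induction cs' with
      | nil =>
        intro _ s es _
        simp [List.foldl]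
      | cons c cs' ihc =>
        intro hsub s es hes
        rw [List.foldl_cons, List.foldl_cons]
        have hcmem : c ∈ cs := hsub c (List.mem_cons_self ..)
        rcases hwc : pvWalk nd f c with _ | q
        · have hA : pvFA nd f n (some (pvApplyEntries es (m.insert n s))) c = none := by
            simp [pvFA, IH, hwc]
          have hB : pvFB nd f (some (s, es)) c = none := by simp [pvFB, hwc]
          rw [hA, hB, pvFoldl_none_absorb _ (fun c => rfl), pvFoldl_none_absorb _ (fun c => rfl)]
          rfl
        · obtain ⟨sc, esc⟩ := q
          obtain ⟨tc, htc⟩ := pvWalk_shape hwc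
          have hnotn : ∀ v, (n, v) ∉ esc := pvEntry_not_ancestor hg hcmem hwc
          have hnotc_t : ∀ v, (c, v) ∉ tc := pvWalk_no_self_tail (htc ▸ hwc)
          have hesesc : ∀ v, (n, v) ∉ es ++ esc := by
            intro v hv
            rcases List.mem_append.mp hv with hv | hv
            · exact hes v hv
            · exact hnotn v hv
          -- the A-side step collapses to one overwrite of key n past (es ++ esc)
          have hA : pvFA nd f n (some (pvApplyEntries es (m.insert n s))) c =
              some (pvApplyEntries (es ++ esc) (m.insert n (PySem.Set.add (PySem.Set.update s sc) c))) := by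
            have hM' : pvAcore nd f c (pvApplyEntries es (m.insert n s)) =
                some (pvApplyEntries esc (pvApplyEntries es (m.insert n s))) := by
              rw [IH, hwc]
              rfl
            simp only [pvFA, Option.bind_some, hM', Option.map_some, Option.some.injEq]
            rw [← pvApplyEntries_append]
            have hgc : (pvApplyEntries (es ++ esc) (m.insert n s)).getD c [] = sc := by
              rw [htc, List.append_cons, pvApplyEntries_append,
                pvGetD_applyEntries_notmem tc _ hnotc_t, pvApplyEntries_append,
                pvApplyEntries_cons]
              exact PySem.Dict.getD_insert_self _ _ _ _
            rw [hgc]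
            simp only [PySem.Dict.modify]
            rw [pvGetD_reserved hesesc, PySem.Dict.getD_insert_self, pvSetKey hesesc,
              pvSetKey hesesc]
          have hB : pvFB nd f (some (s, es)) c =
              some (PySem.Set.add (PySem.Set.update s sc) c, es ++ esc) := by
            simp [pvFB, hwc]
          rw [hA, hB]
          exact ihc (fun c' hc' => hsub c' (List.mem_cons_of_mem _ hc')) _ _ hesesc

-- ===== VERDICT (by name: the statement is the Claim_ definition above) =====
theorem get_nodes_to_all_descendents_py_spec : Claim_equal_get_nodes_to_all_descendents_py := by
  intro nodes root mapping _ _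
  unfold Spec_get_nodes_to_all_descendents_py
  unfold get_nodes_to_all_descendents_py get_nodes_to_all_descendents_py_alt
  rcases mapping with _ | m <;>
  · simp only [pvMain]
    rcases hw : pvWalk (PySem.Dict.ofList nodes) (nodes.length + 2) root with _ | p <;> simp
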